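-- pv_equiv track=rewrite | github.com/mattjklassen/words | code/edges2.py | subalphas
-- ===== SOURCE A (Python) =====
-- def remove_i(alpha, i):
-- # Removes the character at the i-th index of a string.
--   if not 0 <= i < len(alpha):
--         raise IndexError("Index is out of bounds")
--   return alpha[:i] + alpha[i+1:]
--
-- def subalphas(alpha):
--     k = len(alpha)
--     subs = []
--     previous = ""
--     for i in range(k):
--         if alpha[i] != previous:
--             new = remove_i(alpha, i)
--             subs.append(new)
--         previous = alpha[i]
--     return subs
-- ===== SOURCE B (Python) =====
-- def subalphas(alpha):
--     # All n single-character removals, deduplicated keeping the first occurrence: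
--     # removing any character of a maximal run of equal adjacent characters yields
--     # the same string, so exactly the first removal of each run survives.
--     return list(dict.fromkeys(alpha[:i] + alpha[i+1:] for i in range(len(alpha))))
-- ===== Notes on version B (the rewrite author's own statement) =====
-- stated objective: simpler
-- what changed: B builds all n one-character removals and deduplicates them by first occurrence with dict.fromkeys, instead of A's stateful scan comparing each character with the tracked previous one; removals taken inside the same run of equal adjacent characters produce identical strings, so exactly one string per run survives, in A's order.
import Mathlib
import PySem

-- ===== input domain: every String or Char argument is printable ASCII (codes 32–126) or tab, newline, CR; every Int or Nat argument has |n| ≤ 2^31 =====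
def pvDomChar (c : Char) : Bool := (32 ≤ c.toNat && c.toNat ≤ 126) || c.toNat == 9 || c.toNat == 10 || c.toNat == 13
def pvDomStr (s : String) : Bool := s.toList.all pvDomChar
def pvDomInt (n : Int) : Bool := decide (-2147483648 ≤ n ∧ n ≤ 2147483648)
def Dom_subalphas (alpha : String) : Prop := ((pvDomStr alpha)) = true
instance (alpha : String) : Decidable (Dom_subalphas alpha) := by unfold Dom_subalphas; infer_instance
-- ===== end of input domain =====

-- B replaces A's stateful scan (tracking the previous character) by generating all n
-- one-character removals and deduplicating them by first occurrence (dict.fromkeys):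
-- removals inside one run of equal adjacent characters coincide, so one per run survives.


-- shared helper: the expression alpha[:i] + alpha[i+1:] (it appears verbatim in BOTH
-- Python sources: in A's remove_i and in B's generator; the 0 <= i < len bounds check of
-- remove_i never fails in A, since every call comes from 'for i in range(k)').
def pvRemI (l : List Char) (i : Int) : List Char :=
  PySem.List.slice l none (some i) ++ PySem.List.slice l (some (i + 1)) none

-- ===== PORT A =====
-- literal port of A: for i in range(k) with state (subs, previous); previous is a Python
-- string ("" initially, alpha[i] afterwards), modelled as a List Char.
def subalphas (alpha : String) : List String :=
  let l := alpha.toList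
  let k : Int := l.length
  let r := (PySem.List.pyRange 0 k 1).foldl
    (fun (st : List String × List Char) i =>
      let c := [PySem.List.pyGetD l i ' ']
      let subs := if c ≠ st.2 then st.1 ++ [String.ofList (pvRemI l i)] else st.1
      (subs, c))
    ([], ([] : List Char))
  r.1

-- ===== PORT B =====
-- literal port of B: the generator of all removals alpha[:i] + alpha[i+1:] for i in
-- range(len(alpha)), then list(dict.fromkeys(...)) = first-occurrence dedup (PySem.List.dedup).
def subalphas_alt (alpha : String) : List String :=
  let l := alpha.toList
  PySem.List.dedup ((PySem.List.pyRange 0 (l.length : Int) 1).map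
    (fun i => String.ofList (pvRemI l i)))

-- ===== PRECONDITION & SPEC =====
def Spec_subalphas (alpha : String) (out : List String) : Prop := out = subalphas_alt alpha
instance (alpha : String) (out : List String) : Decidable (Spec_subalphas alpha out) := by unfold Spec_subalphas; infer_instance

-- ===== CLAIM (what is proved, stated in full; the proofs are below) =====
def Claim_equal_subalphas : Prop := ∀ (alpha : String), Dom_subalphas alpha → Spec_subalphas alpha (subalphas alpha)

-- ===== LEMMAS AND PROOFS =====

-- the removal of index i, 0 ≤ i < |l|, as a plain take/drop expression
def pvRem (l : List Char) (i : Nat) : List Char := l.take i ++ l.drop (i + 1)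

theorem pvRemI_natCast (l : List Char) (i : Nat) :
    pvRemI l (i : Int) = pvRem l i := by
  unfold pvRemI pvRem
  rw [PySem.List.slice_to l (by positivity)]
  rw [show ((i : Int) + 1) = ((i + 1 : Nat) : Int) by push_cast; ring]
  rw [PySem.List.slice_from l (by positivity)]
  simp

-- common specification: scan the suffix 'rest' of l starting at index i with previous-string p,
-- emitting the removal at each position whose (one-char) string differs from p.
def pvFspec (l : List Char) : Nat → List Char → List Char → List String
  | _, _, [] => []
  | i, p, c :: rs =>
    (if [c] ≠ p then [String.ofList (pvRem l i)] else []) ++ pvFspec l (i + 1) [c] rs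

-- A's fold over range(i, k) equals pvFspec on the suffix l.drop i.
theorem pvAfold (l : List Char) :
    ∀ n i (p : List Char) (acc : List String), l.length ≤ i + n →
    ((PySem.List.pyRange (i : Int) (l.length : Int) 1).foldl
      (fun (st : List String × List Char) j =>
        let c := [PySem.List.pyGetD l j ' ']
        let subs := if c ≠ st.2 then st.1 ++ [String.ofList (pvRemI l j)] else st.1
        (subs, c))
      (acc, p)).1 = acc ++ pvFspec l i p (l.drop i) := by
  intro n
  induction n with
  | zero =>
      intro i p acc h
      rw [PySem.List.pyRange_one_eq_nil (by exact_mod_cast Nat.le_of_lt_succ (Nat.lt_succ_of_le (by omega)))]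
      rw [List.drop_eq_nil_of_le (by omega)]
      simp [pvFspec]
  | succ m ih =>
      intro i p acc h
      by_cases hik : i < l.length
      · rw [PySem.List.pyRange_one_cons (by exact_mod_cast hik)]
        rw [List.foldl_cons]
        have hget : PySem.List.pyGetD l (i : Int) ' ' = l[i] := by
          rw [PySem.List.pyGetD_natCast]
          exact List.getD_eq_getElem l ' ' hik
        have hdrop : l.drop i = l[i] :: l.drop (i + 1) := List.drop_eq_getElem_cons hik
        rw [show ((i : Int) + 1) = ((i + 1 : Nat) : Int) by push_cast; ring]
        rw [ih (i + 1) _ _ (by omega)]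
        simp only [hget, pvRemI_natCast, hdrop, pvFspec]
        by_cases hc : [l[i]] ≠ p
        · simp [hc]
        · simp [hc]
      · rw [PySem.List.pyRange_one_eq_nil (by exact_mod_cast Nat.le_of_not_lt hik)]
        rw [List.drop_eq_nil_of_le (by omega)]
        simp [pvFspec]

theorem pvA_eq_fspec (alpha : String) :
    subalphas alpha = pvFspec alpha.toList 0 [] alpha.toList := by
  unfold subalphas
  have := pvAfold alpha.toList alpha.toList.length 0 [] []
  simp only [Nat.cast_zero, Nat.zero_add, List.drop_zero, List.nil_append] at this
  exact this (by omega)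

-- index-based form of the same output: emit exactly at the first index of each run
def pvIdxSpec (l : List Char) : Nat → Nat → List String
  | 0, _ => []
  | m + 1, i =>
    (if i < l.length ∧ (i = 0 ∨ l[i - 1]? ≠ l[i]?) then [String.ofList (pvRem l i)] else [])
      ++ pvIdxSpec l m (i + 1)

theorem pvIdxSpec_nil (l : List Char) :
    ∀ m i, l.length ≤ i → pvIdxSpec l m i = [] := by
  intro m
  induction m with
  | zero => intro i _; rfl
  | succ k ih =>
      intro i h
      simp only [pvIdxSpec]
      rw [if_neg (by omega), ih (i + 1) (by omega)]
      rfl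

theorem pvRem_get? (l : List Char) (i m : Nat) (hi : i ≤ l.length) :
    (pvRem l i)[m]? = if m < i then l[m]? else l[m + 1]? := by
  unfold pvRem
  rw [List.getElem?_append]
  rw [List.length_take]
  by_cases hm : m < i
  · rw [if_pos (by omega), if_pos hm, List.getElem?_take, if_pos hm]
  · rw [if_neg (by omega), if_neg hm, List.getElem?_drop]
    congr 1
    omega

theorem pvRem_succ_iff (l : List Char) (i : Nat) (h : i + 1 ≤ l.length) :
    pvRem l i = pvRem l (i + 1) ↔ l[i]? = l[i + 1]? := by
  constructor
  · intro heq
    have := congrArg (fun t => t[i]?) heq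
    simp only at this
    rw [pvRem_get? l i i (by omega), pvRem_get? l (i + 1) i (by omega)] at this
    rw [if_neg (by omega), if_pos (by omega)] at this
    exact this.symm
  · intro hc
    apply List.ext_getElem?
    intro m
    rw [pvRem_get? l i m (by omega), pvRem_get? l (i + 1) m (by omega)]
    by_cases h1 : m < i
    · rw [if_pos h1, if_pos (by omega)]
    · by_cases h2 : m < i + 1
      · have : m = i := by omega
        subst this
        rw [if_neg h1, if_pos h2, hc]
      · rw [if_neg h1, if_neg h2]

theorem pvRem_ne (l : List Char) (j i : Nat) (hj : j < i) (hi : i < l.length)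
    (hne : l[i - 1]? ≠ l[i]?) : pvRem l j ≠ pvRem l i := by
  intro heq
  have := congrArg (fun t => t[i - 1]?) heq
  simp only at this
  rw [pvRem_get? l j (i - 1) (by omega), pvRem_get? l i (i - 1) (by omega)] at this
  rw [if_neg (by omega), if_pos (by omega)] at this
  rw [show i - 1 + 1 = i by omega] at this
  exact hne this.symm

theorem pvExists_iff (l : List Char) (i : Nat) (hi : i < l.length) :
    (∃ j, j < i ∧ pvRem l j = pvRem l i) ↔ ¬(i = 0 ∨ l[i - 1]? ≠ l[i]?) := by
  push Not
  constructor
  · rintro ⟨j, hj, heq⟩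
    have hi0 : i ≠ 0 := by omega
    refine ⟨hi0, ?_⟩
    by_contra hne
    exact pvRem_ne l j i hj hi hne heq
  · rintro ⟨hi0, hc⟩
    refine ⟨i - 1, by omega, ?_⟩
    have h := (pvRem_succ_iff l (i - 1) (by omega)).mpr
    rw [show i - 1 + 1 = i by omega] at h
    exact h hc

theorem pvOfList_inj {a b : List Char} (h : String.ofList a = String.ofList b) : a = b := by
  have := congrArg String.toList h
  simpa using this

-- B's dedup fold (dict.fromkeys) over the removals from index i on, given that acc holds
-- exactly the removal strings of indices below i, appends pvIdxSpec.
theorem pvBfold (l : List Char) :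
    ∀ m i (acc : PySem.Set String), l.length ≤ i + m →
    (∀ s, s ∈ acc ↔ ∃ j, j < i ∧ String.ofList (pvRem l j) = s) →
    ((PySem.List.pyRange (i : Int) (l.length : Int) 1).map
      (fun j => String.ofList (pvRemI l j))).foldl PySem.Set.add acc
      = acc ++ pvIdxSpec l m i := by
  intro m
  induction m with
  | zero =>
      intro i acc h _
      rw [PySem.List.pyRange_one_eq_nil (by exact_mod_cast (by omega : l.length ≤ i))]
      simp [pvIdxSpec]
  | succ k ih =>
      intro i acc h hinv
      by_cases hik : i < l.length
      · rw [PySem.List.pyRange_one_cons (by exact_mod_cast hik)]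
        rw [List.map_cons, List.foldl_cons, pvRemI_natCast]
        have hmem : String.ofList (pvRem l i) ∈ acc ↔ ¬(i = 0 ∨ l[i - 1]? ≠ l[i]?) := by
          rw [hinv, ← pvExists_iff l i hik]
          constructor
          · rintro ⟨j, hj, heq⟩; exact ⟨j, hj, pvOfList_inj heq⟩
          · rintro ⟨j, hj, heq⟩; exact ⟨j, hj, by rw [heq]⟩
        rw [show ((i : Int) + 1) = ((i + 1 : Nat) : Int) by push_cast; ring]
        by_cases hc : i = 0 ∨ l[i - 1]? ≠ l[i]?
        · -- new string: appended
          have hnot : ¬ String.ofList (pvRem l i) ∈ acc := by rw [hmem]; exact not_not_intro hc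
          have hadd : PySem.Set.add acc (String.ofList (pvRem l i))
              = acc ++ [String.ofList (pvRem l i)] := by
            unfold PySem.Set.add PySem.Set.contains
            rw [if_neg (by simpa [List.contains_iff_mem] using hnot)]
          rw [hadd, ih (i + 1) _ (by omega) ?_]
          · simp only [pvIdxSpec, if_pos (And.intro hik hc)]
            simp [List.append_assoc]
          · intro s
            simp only [List.mem_append, List.mem_singleton, hinv]
            constructor
            · rintro (⟨j, hj, heq⟩ | heq)
              · exact ⟨j, by omega, heq⟩
              · exact ⟨i, by omega, heq.symm⟩
            · rintro ⟨j, hj, heq⟩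
              by_cases hji : j < i
              · exact Or.inl ⟨j, hji, heq⟩
              · have : j = i := by omega
                subst this
                exact Or.inr heq.symm
        · -- seen before: dropped
          have hin : String.ofList (pvRem l i) ∈ acc := by rw [hmem]; exact hc
          have hadd : PySem.Set.add acc (String.ofList (pvRem l i)) = acc := by
            unfold PySem.Set.add PySem.Set.contains
            rw [if_pos (by simpa [List.contains_iff_mem] using hin)]
          rw [hadd, ih (i + 1) _ (by omega) ?_]
          · simp only [pvIdxSpec]
            rw [if_neg (by tauto)]
            rfl
          · intro s
            rw [hinv]
            constructor
            · rintro ⟨j, hj, heq⟩; exact ⟨j, by omega, heq⟩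
            · rintro ⟨j, hj, heq⟩
              by_cases hji : j < i
              · exact ⟨j, hji, heq⟩
              · have : j = i := by omega
                subst this
                exact heq ▸ (hinv (String.ofList (pvRem l j))).mp hin
      · rw [PySem.List.pyRange_one_eq_nil (by exact_mod_cast Nat.le_of_not_lt hik)]
        rw [pvIdxSpec_nil l _ _ (by omega)]
        simp

-- A's common specification equals the index-based form.
theorem pvFspec_eq_idx (l : List Char) :
    ∀ m i (p : List Char), l.length ≤ i + m →
    ((i = 0 ∧ p = []) ∨ (0 < i ∧ ∃ c, p = [c] ∧ l[i - 1]? = some c)) →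
    pvFspec l i p (l.drop i) = pvIdxSpec l m i := by
  intro m
  induction m with
  | zero =>
      intro i p h _
      rw [List.drop_eq_nil_of_le (by omega)]
      rfl
  | succ k ih =>
      intro i p h hp
      by_cases hik : i < l.length
      · have hdrop : l.drop i = l[i] :: l.drop (i + 1) := List.drop_eq_getElem_cons hik
        rw [hdrop]
        have hgi : l[i]? = some l[i] := List.getElem?_eq_getElem hik
        have hcond : ([l[i]] ≠ p) ↔ (i = 0 ∨ l[i - 1]? ≠ l[i]?) := by
          rcases hp with ⟨hi0, hpe⟩ | ⟨hi0, c, hpe, hc⟩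
          · subst hpe; simp [hi0]
          · subst hpe
            constructor
            · intro hne
              right
              rw [hc, hgi]
              intro hss
              have hcl : c = l[i] := by simpa using hss
              exact hne (by rw [hcl])
            · rintro (h0 | hne) hss
              · omega
              · have hlc : l[i] = c := by simpa using hss
                rw [hc, hgi, hlc] at hne
                exact hne rfl
        have hrec : pvFspec l (i + 1) [l[i]] (l.drop (i + 1)) = pvIdxSpec l k (i + 1) := by
          apply ih (i + 1) _ (by omega)
          exact Or.inr ⟨by omega, l[i], rfl, by simp [hgi]⟩
        simp only [pvFspec, pvIdxSpec, hrec]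
        by_cases hc : [l[i]] ≠ p
        · rw [if_pos hc, if_pos ⟨hik, hcond.mp hc⟩]
        · rw [if_neg hc]
          rw [if_neg (fun hh => hc (hcond.mpr hh.2))]
      · rw [List.drop_eq_nil_of_le (by omega)]
        rw [pvIdxSpec_nil l _ _ (by omega)]
        rfl

-- ===== VERDICT (by name: the statement is the Claim_ definition above) =====
theorem subalphas_spec : Claim_equal_subalphas := by
  intro alpha _
  unfold Spec_subalphas subalphas_alt PySem.List.dedup PySem.Set.ofList
  rw [pvA_eq_fspec]
  have hA : pvFspec alpha.toList 0 [] alpha.toList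
      = pvIdxSpec alpha.toList alpha.toList.length 0 := by
    have := pvFspec_eq_idx alpha.toList alpha.toList.length 0 [] (by omega) (Or.inl ⟨rfl, rfl⟩)
    simpa using this
  have hB := pvBfold alpha.toList alpha.toList.length 0 PySem.Set.empty (by omega)
    (by intro s; simp [PySem.Set.empty])
  simp only [Nat.cast_zero] at hB
  rw [hA]
  simpa using hB.symm
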